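-- pv_equiv track=rewrite | github.com/CAgAG/Arithmetic_PY | 数组/任务调度.py | chargeMission
-- ===== SOURCE A (Python) =====
-- def chargeMission(M: list, N: int):
--     if M is None or N <= 0:
--         return None
--
--     # 服务器数量
--     length = len(M)
--     # 计算每个服务器的分配任务时间
--     proTime = [0] * length
--
--     for _ in range(N):
--         # 第一台服务器时间设为耗时最短
--         minTime = proTime[0] + M[0]
--         minIndex = 0
--
--         # 其他服务器
--         # 选出耗时短的服务器
--         j = 1
--         while j < length:
--             if minTime > proTime[j] + M[j]:
--                 minTime = proTime[j] + M[j]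
--                 minIndex = j
--
--             j += 1
--         # 耗时最少的服务器, 时间累计
--         proTime[minIndex] += M[minIndex]
--     return proTime
-- ===== SOURCE B (Python) =====
-- def chargeMission(M: list, N: int):
--     if M is None or N <= 0:
--         return None
--     length = len(M)
--     proTime = [0] * length
--     # sorted priority queue of pairs (proTime[i] + M[i], i), ascending
--     pq = []
--     for i in range(length):
--         _pq_insert(pq, (M[i], i))
--     for _ in range(N):
--         t, i = pq.pop(0)
--         proTime[i] = t
--         _pq_insert(pq, (t + M[i], i))
--     return proTime
--
--
-- def _pq_insert(pq, key):
--     for pos in range(len(pq)):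
--         if key < pq[pos]:
--             pq.insert(pos, key)
--             return
--     pq.append(key)
-- ===== Notes on version B (the rewrite author's own statement) =====
-- stated objective: faster
-- what changed: B keeps a sorted priority queue of (finish-time, index) pairs and pops/re-inserts one entry per task, instead of A's full Python-level rescan of all servers for every task.
import Mathlib
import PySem

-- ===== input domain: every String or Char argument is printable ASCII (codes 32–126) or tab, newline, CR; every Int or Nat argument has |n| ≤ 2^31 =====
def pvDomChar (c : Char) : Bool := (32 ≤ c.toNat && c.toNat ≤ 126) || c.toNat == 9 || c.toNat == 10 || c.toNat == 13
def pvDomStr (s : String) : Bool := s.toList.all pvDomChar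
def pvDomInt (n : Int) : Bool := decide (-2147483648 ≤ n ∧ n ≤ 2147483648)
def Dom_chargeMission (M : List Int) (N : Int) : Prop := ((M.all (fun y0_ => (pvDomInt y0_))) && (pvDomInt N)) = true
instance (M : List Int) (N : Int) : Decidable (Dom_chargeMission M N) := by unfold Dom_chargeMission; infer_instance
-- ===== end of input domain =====

-- B replaces A's per-task full rescan for the least-loaded server by a sorted priority
-- queue of (finish-time, index) pairs popped and re-inserted once per task (objective: alternative).

-- ===== PORT A =====
-- the `while j < length` scan: state (minTime, minIndex); j runs over 1,…,length-1,
-- always in range, so proTime[j]/M[j] are getD (exact for in-range indices)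
def pvScanA (M pt : List Int) : List Nat → Int × Nat → Int × Nat
  | [], acc => acc
  | j :: js, (mt, mi) =>
      if mt > pt.getD j 0 + M.getD j 0 then pvScanA M pt js (pt.getD j 0 + M.getD j 0, j)
      else pvScanA M pt js (mt, mi)

-- one iteration of A's `for _ in range(N)` body; none = IndexError on proTime[0]/M[0]
def pvStepA (M pt : List Int) : Option (List Int) :=
  match PySem.List.pyGet? pt 0, PySem.List.pyGet? M 0 with
  | some p0, some m0 =>
      let r := pvScanA M pt (List.range' 1 (M.length - 1)) (p0 + m0, 0)
      some (pt.set r.2 (pt.getD r.2 0 + M.getD r.2 0))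
  | _, _ => none

def pvLoopA (M : List Int) : Nat → List Int → Option (List Int)
  | 0, pt => some pt
  | n+1, pt =>
      match pvStepA M pt with
      | some pt' => pvLoopA M n pt'
      | none => none

def chargeMission (M : List Int) (N : Int) : Option (List Int) :=
  if N ≤ 0 then none
  else pvLoopA M N.toNat (List.replicate M.length 0)

-- ===== PORT B =====
-- Python tuple comparison `key < pq[pos]` on pairs of ints
def pvLtP (a b : Int × Int) : Bool := a.1 < b.1 || (a.1 == b.1 && a.2 < b.2)

-- _pq_insert: walk to the first position whose entry exceeds key, insert there (append at end)
def pvIns (key : Int × Int) : List (Int × Int) → List (Int × Int)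
  | [] => [key]
  | x :: xs => if pvLtP key x then key :: x :: xs else x :: pvIns key xs

-- one iteration of B's task loop; none = IndexError on pq.pop(0); the popped index i is a
-- valid nonnegative list index, so proTime[i] = t is List.set i.toNat and M[i] is getD
def pvStepB (M : List Int) : List Int × List (Int × Int) → Option (List Int × List (Int × Int))
  | (_, []) => none
  | (pt, (t, i) :: rest) =>
      some (pt.set i.toNat t, pvIns (t + M.getD i.toNat 0, i) rest)

def pvLoopB (M : List Int) : Nat → List Int × List (Int × Int) → Option (List Int)
  | 0, st => some st.1
  | n+1, st =>
      match pvStepB M st with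
      | some st' => pvLoopB M n st'
      | none => none

def chargeMission_alt (M : List Int) (N : Int) : Option (List Int) :=
  if N ≤ 0 then none
  else pvLoopB M N.toNat
    (List.replicate M.length 0,
     (PySem.List.enumerate M).foldl (fun pq im => pvIns (im.2, im.1) pq) [])

-- ===== PRECONDITION & SPEC =====
-- Pre_ excludes only M = [] with N > 0, where Python A raises IndexError (B raises too)
def Pre_chargeMission (M : List Int) (N : Int) : Prop := M ≠ [] ∨ N ≤ 0
instance (M : List Int) (N : Int) : Decidable (Pre_chargeMission M N) := by
  unfold Pre_chargeMission; infer_instance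

def pvWitness_chargeMission : List Int × Int := ([2, 3, 2], 5)

def Spec_chargeMission (M : List Int) (N : Int) (out : Option (List Int)) : Prop := out = chargeMission_alt M N
instance (M : List Int) (N : Int) (out : Option (List Int)) : Decidable (Spec_chargeMission M N out) := by unfold Spec_chargeMission; infer_instance

-- ===== CLAIM (what is proved, stated in full; the proofs are below) =====
def Claim_equal_chargeMission : Prop := ∀ (M : List Int) (N : Int), Dom_chargeMission M N → Pre_chargeMission M N → Spec_chargeMission M N (chargeMission M N)

-- ===== LEMMAS AND PROOFS =====

-- the entry the queue keeps for server i, as a function of the current load table pt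
def pvEnt (M pt : List Int) (i : Nat) : Int × Int := (pt.getD i 0 + M.getD i 0, (i : Int))

def pvEntries (M pt : List Int) : List (Int × Int) := (List.range M.length).map (pvEnt M pt)

-- non-strict lexicographic order on pairs
def pvLeP (a b : Int × Int) : Prop := a.1 < b.1 ∨ (a.1 = b.1 ∧ a.2 ≤ b.2)

-- the invariant tying B's state to A's
def pvInv (M pt : List Int) (pq : List (Int × Int)) : Prop :=
  pt.length = M.length ∧ pq.Pairwise pvLeP ∧ pq.Perm (pvEntries M pt)

lemma pvLtP_iff (a b : Int × Int) : pvLtP a b = true ↔ (a.1 < b.1 ∨ (a.1 = b.1 ∧ a.2 < b.2)) := by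
  simp [pvLtP]

lemma pvLeP_antisymm {a b : Int × Int} (h1 : pvLeP a b) (h2 : pvLeP b a) : a = b := by
  unfold pvLeP at *
  have : a.1 = b.1 ∧ a.2 = b.2 := by omega
  exact Prod.ext this.1 this.2

lemma pvLeP_trans {a b c : Int × Int} (h1 : pvLeP a b) (h2 : pvLeP b c) : pvLeP a c := by
  unfold pvLeP at *; omega

lemma pvLeP_refl (a : Int × Int) : pvLeP a a := Or.inr ⟨rfl, le_refl _⟩

lemma pvIns_perm (key : Int × Int) (l : List (Int × Int)) : (pvIns key l).Perm (key :: l) := by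
  induction l with
  | nil => simp [pvIns]
  | cons x xs ih =>
      by_cases h : pvLtP key x
      · simp [pvIns, h]
      · have hb : pvLtP key x = false := by simpa using h
        simp only [pvIns, hb, Bool.false_eq_true, if_false]
        exact (ih.cons x).trans (List.Perm.swap key x xs)

lemma pvIns_sorted {l : List (Int × Int)} (key : Int × Int) (hs : l.Pairwise pvLeP) :
    (pvIns key l).Pairwise pvLeP := by
  induction l with
  | nil => simp [pvIns]
  | cons x xs ih =>
      rcases List.pairwise_cons.mp hs with ⟨hx, hxs⟩
      by_cases h : pvLtP key x
      · have hkx : pvLeP key x := by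
          rcases (pvLtP_iff key x).mp h with h1 | h2
          · exact Or.inl h1
          · exact Or.inr ⟨h2.1, le_of_lt h2.2⟩
        simp only [pvIns, h, if_true]
        refine List.pairwise_cons.mpr ⟨?_, hs⟩
        intro y hy
        rcases List.mem_cons.mp hy with rfl | hy'
        · exact hkx
        · exact pvLeP_trans hkx (hx y hy')
      · have hxk : pvLeP x key := by
          have := (pvLtP_iff key x).not.mp (by simpa using h)
          unfold pvLeP; omega
        have hb : pvLtP key x = false := by simpa using h
        simp only [pvIns, hb, Bool.false_eq_true, if_false]
        refine List.pairwise_cons.mpr ⟨?_, ih hxs⟩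
        intro y hy
        have : y ∈ key :: xs := (pvIns_perm key xs).mem_iff.mp hy
        rcases List.mem_cons.mp this with rfl | hy'
        · exact hxk
        · exact hx y hy'

-- the head of a sorted queue is pvLeP-below every element of the queue
lemma pvHead_min {x : Int × Int} {rest : List (Int × Int)} (hs : (x :: rest).Pairwise pvLeP) :
    ∀ y ∈ x :: rest, pvLeP x y := by
  intro y hy
  rcases List.mem_cons.mp hy with rfl | hy'
  · exact pvLeP_refl y
  · exact (List.pairwise_cons.mp hs).1 y hy'

lemma pvLen_entries (M pt : List Int) : (pvEntries M pt).length = M.length := by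
  simp [pvEntries]

lemma pvGetElem_entries (M pt : List Int) (i : Nat) (h : i < M.length) :
    (pvEntries M pt)[i]'(by simpa [pvEntries] using h) = pvEnt M pt i := by
  simp [pvEntries]

-- A's scan computes a pvLeP-minimum of the entries it visits
lemma pvScanA_spec (M pt : List Int) :
    ∀ (js : List Nat) (acc : Int × Nat),
      acc.1 = pt.getD acc.2 0 + M.getD acc.2 0 →
      js.Pairwise (· < ·) →
      (∀ j ∈ js, acc.2 < j) →
      (pvScanA M pt js acc).1 = pt.getD (pvScanA M pt js acc).2 0 + M.getD (pvScanA M pt js acc).2 0 ∧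
      (pvScanA M pt js acc = acc ∨ (pvScanA M pt js acc).2 ∈ js) ∧
      pvLeP ((pvScanA M pt js acc).1, ((pvScanA M pt js acc).2 : Int)) (acc.1, (acc.2 : Int)) ∧
      (∀ j ∈ js, pvLeP ((pvScanA M pt js acc).1, ((pvScanA M pt js acc).2 : Int)) (pvEnt M pt j)) := by
  intro js
  induction js with
  | nil =>
      intro acc h1 _ _
      exact ⟨h1, Or.inl rfl, pvLeP_refl _, by simp⟩
  | cons j js ih =>
      intro acc h1 hp hlt
      obtain ⟨mt, mi⟩ := acc
      rcases List.pairwise_cons.mp hp with ⟨hjs, hp'⟩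
      by_cases hc : mt > pt.getD j 0 + M.getD j 0
      · have hres : pvScanA M pt (j :: js) (mt, mi) =
            pvScanA M pt js (pt.getD j 0 + M.getD j 0, j) := by
          simp only [pvScanA]; rw [if_pos hc]
        obtain ⟨k1, k2, k3, k4⟩ := ih (pt.getD j 0 + M.getD j 0, j) rfl hp' (by
          intro j' hj'; exact hjs j' hj')
        rw [hres]
        refine ⟨k1, ?_, ?_, ?_⟩
        · rcases k2 with h | h
          · refine Or.inr ?_
            rw [h]
            exact List.mem_cons_self
          · exact Or.inr (List.mem_cons_of_mem _ h)
        · refine pvLeP_trans k3 (Or.inl ?_)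
          simpa using hc
        · intro j' hj'
          rcases List.mem_cons.mp hj' with rfl | hj''
          · exact k3
          · exact k4 j' hj''
      · have hres : pvScanA M pt (j :: js) (mt, mi) = pvScanA M pt js (mt, mi) := by
          simp only [pvScanA]; rw [if_neg hc]
        obtain ⟨k1, k2, k3, k4⟩ := ih (mt, mi) h1 hp' (by
          intro j' hj'; exact hlt j' (List.mem_cons_of_mem _ hj'))
        rw [hres]
        refine ⟨k1, ?_, k3, ?_⟩
        · rcases k2 with h | h
          · exact Or.inl h
          · exact Or.inr (List.mem_cons_of_mem _ h)
        · intro j' hj'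
          rcases List.mem_cons.mp hj' with rfl | hj''
          · refine pvLeP_trans k3 ?_
            have hmi : mi < j' := hlt j' List.mem_cons_self
            simp only [pvEnt, pvLeP]
            omega
          · exact k4 j' hj''

lemma pvGet0 (l : List Int) (h : l ≠ []) : PySem.List.pyGet? l 0 = some (l.getD 0 0) := by
  cases l with
  | nil => exact absurd rfl h
  | cons x xs => simp [PySem.List.pyGet?, PySem.List.pyIdx?]

lemma pvEntries_set (M pt : List Int) (m : Nat) (v : Int) (_hm : m < M.length)
    (hlen : pt.length = M.length) :
    pvEntries M (pt.set m v) = (pvEntries M pt).set m (v + M.getD m 0, (m : Int)) := by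
  apply List.ext_getElem
  · simp [pvEntries]
  · intro i h1 h2
    have hiM : i < M.length := by simpa [pvEntries] using h1
    have hipt : i < pt.length := by omega
    simp only [pvEntries, List.getElem_set, List.getElem_map, List.getElem_range]
    by_cases hmi : m = i
    · subst hmi
      simp [pvEnt, hipt]
    · simp only [hmi, if_false]
      simp [pvEnt, hmi, hipt, hiM]

-- one synchronized step
lemma pvStep_sync (M pt : List Int) (pq : List (Int × Int)) (hM : M ≠ [])
    (hinv : pvInv M pt pq) :
    ∃ pt' pq', pvStepA M pt = some pt' ∧ pvStepB M (pt, pq) = some (pt', pq') ∧ pvInv M pt' pq' := by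
  obtain ⟨hlen, hsort, hperm⟩ := hinv
  have hMlen : 0 < M.length := List.length_pos_of_ne_nil hM
  have hpt : pt ≠ [] := by
    intro h; rw [h] at hlen; simp at hlen; omega
  -- A's step
  set r := pvScanA M pt (List.range' 1 (M.length - 1)) (pt.getD 0 0 + M.getD 0 0, 0) with hr
  have hrange : (List.range' 1 (M.length - 1)).Pairwise (· < ·) := by
    rw [List.range'_eq_map_range]
    exact List.Pairwise.map _ (fun a b h => by omega) List.pairwise_lt_range
  obtain ⟨k1, k2, k3, k4⟩ := pvScanA_spec M pt (List.range' 1 (M.length - 1))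
    (pt.getD 0 0 + M.getD 0 0, 0) rfl hrange (by
      intro j hj
      have := List.mem_range'_1.mp hj
      omega)
  rw [← hr] at k1 k2 k3 k4
  have hr2 : r.2 < M.length := by
    rcases k2 with h | h
    · rw [h]; exact hMlen
    · have := List.mem_range'_1.mp h; omega
  clear k2
  -- r is a pvLeP-minimum of all entries
  have hrmin : ∀ i < M.length, pvLeP (r.1, (r.2 : Int)) (pvEnt M pt i) := by
    intro i hi
    rcases Nat.eq_zero_or_pos i with rfl | hipos
    · simpa [pvEnt] using k3
    · exact k4 i (List.mem_range'_1.mpr ⟨hipos, by omega⟩)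
  have hrent : ((r.1, (r.2 : Int)) : Int × Int) = pvEnt M pt r.2 := by
    simp only [pvEnt, Prod.mk.injEq]
    exact ⟨k1, trivial⟩
  -- B's queue is nonempty
  have hpq : pq ≠ [] := by
    intro h
    rw [h] at hperm
    have : (pvEntries M pt).length = 0 := by
      simpa using hperm.length_eq.symm
    rw [pvLen_entries] at this; omega
  obtain ⟨h0, rest, rfl⟩ := List.exists_cons_of_ne_nil hpq
  -- the head of the queue is exactly A's chosen entry
  have hhead : h0 = pvEnt M pt r.2 := by
    have hin : h0 ∈ pvEntries M pt := hperm.subset List.mem_cons_self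
    obtain ⟨i0, hi0, hh⟩ : ∃ i0, i0 < M.length ∧ h0 = pvEnt M pt i0 := by
      obtain ⟨k, hk, hkeq⟩ := List.mem_iff_getElem.mp hin
      have hkM : k < M.length := by simpa [pvEntries] using hk
      exact ⟨k, hkM, by rw [← hkeq, pvGetElem_entries M pt k hkM]⟩
    have hle1 : pvLeP (pvEnt M pt r.2) h0 := by
      rw [hh, ← hrent]; exact hrmin i0 hi0
    have hle2 : pvLeP h0 (pvEnt M pt r.2) := by
      apply pvHead_min hsort
      apply hperm.symm.subset
      exact List.mem_iff_getElem.mpr ⟨r.2, by simpa [pvEntries] using hr2,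
        pvGetElem_entries M pt r.2 hr2⟩
    exact pvLeP_antisymm hle2 hle1
  -- identify the two successor states
  have htoNat : ((r.2 : Int)).toNat = r.2 := Int.toNat_natCast r.2
  refine ⟨pt.set r.2 (pt.getD r.2 0 + M.getD r.2 0),
          pvIns (pt.getD r.2 0 + M.getD r.2 0 + M.getD r.2 0, (r.2 : Int)) rest, ?_, ?_, ?_, ?_, ?_⟩
  · -- A's step
    simp only [pvStepA, pvGet0 pt hpt, pvGet0 M hM, ← hr]
  · -- B's step
    have : h0 = (pt.getD r.2 0 + M.getD r.2 0, (r.2 : Int)) := by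
      rw [hhead]; rfl
    rw [this]
    simp [pvStepB, htoNat]
  · -- invariant: length
    simp [hlen]
  · -- invariant: sortedness
    exact pvIns_sorted _ (List.Pairwise.of_cons hsort)
  · -- invariant: permutation
    have hset : pvEntries M (pt.set r.2 (pt.getD r.2 0 + M.getD r.2 0)) =
        (pvEntries M pt).set r.2 (pt.getD r.2 0 + M.getD r.2 0 + M.getD r.2 0, (r.2 : Int)) :=
      pvEntries_set M pt r.2 _ hr2 hlen
    rw [hset]
    have hlenE : r.2 < (pvEntries M pt).length := by rw [pvLen_entries]; exact hr2
    -- decompose entries around position r.2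
    have hdecomp : pvEntries M pt =
        (pvEntries M pt).take r.2 ++ (pvEntries M pt)[r.2] :: (pvEntries M pt).drop (r.2 + 1) := by
      rw [List.getElem_cons_drop hlenE, List.take_append_drop]
    have hgetr : (pvEntries M pt)[r.2] = pvEnt M pt r.2 := pvGetElem_entries M pt r.2 hr2
    have hsetdec : (pvEntries M pt).set r.2 (pt.getD r.2 0 + M.getD r.2 0 + M.getD r.2 0, (r.2 : Int)) =
        (pvEntries M pt).take r.2 ++ (pt.getD r.2 0 + M.getD r.2 0 + M.getD r.2 0, (r.2 : Int)) ::
          (pvEntries M pt).drop (r.2 + 1) :=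
      List.set_eq_take_cons_drop _ hlenE
    -- rest is a permutation of entries minus the chosen one
    have hrest : rest.Perm ((pvEntries M pt).take r.2 ++ (pvEntries M pt).drop (r.2 + 1)) := by
      have : (h0 :: rest).Perm (h0 :: ((pvEntries M pt).take r.2 ++ (pvEntries M pt).drop (r.2 + 1))) := by
        refine hperm.trans ?_
        conv_lhs => rw [hdecomp]
        rw [hgetr, ← hhead]
        exact List.perm_middle
      exact this.cons_inv
    refine (pvIns_perm _ _).trans ?_
    refine (hrest.cons _).trans ?_
    rw [hsetdec]
    exact List.perm_middle.symm

lemma pvLoop_eq (M : List Int) (hM : M ≠ []) :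
    ∀ (n : Nat) (pt : List Int) (pq : List (Int × Int)), pvInv M pt pq →
      pvLoopA M n pt = pvLoopB M n (pt, pq) := by
  intro n
  induction n with
  | zero => intro pt pq _; rfl
  | succ n ih =>
      intro pt pq hinv
      obtain ⟨pt', pq', hA, hB, hinv'⟩ := pvStep_sync M pt pq hM hinv
      simp only [pvLoopA, pvLoopB, hA, hB]
      exact ih pt' pq' hinv'

-- building the initial queue by repeated insertion: sortedness and contents
lemma pvBuild (l : List (Int × Int)) :
    ∀ acc : List (Int × Int), acc.Pairwise pvLeP →
      (l.foldl (fun pq im => pvIns (im.2, im.1) pq) acc).Pairwise pvLeP ∧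
      (l.foldl (fun pq im => pvIns (im.2, im.1) pq) acc).Perm
        ((l.map (fun im => (im.2, im.1))) ++ acc) := by
  induction l with
  | nil => intro acc hs; exact ⟨hs, by simp⟩
  | cons x xs ih =>
      intro acc hs
      obtain ⟨s1, s2⟩ := ih (pvIns (x.2, x.1) acc) (pvIns_sorted _ hs)
      refine ⟨s1, ?_⟩
      simp only [List.foldl_cons, List.map_cons, List.cons_append]
      refine s2.trans ?_
      refine (List.Perm.append_left _ (pvIns_perm _ _)).trans ?_
      exact List.perm_middle

lemma pvInit_entries (M : List Int) :
    (PySem.List.enumerate M).map (fun im => (im.2, im.1)) =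
      pvEntries M (List.replicate M.length 0) := by
  apply List.ext_getElem
  · simp [pvEntries, PySem.List.length_enumerate]
  · intro i h1 h2
    have hiM : i < M.length := by simpa [PySem.List.length_enumerate] using h1
    simp [pvEntries, PySem.List.getElem_enumerate, pvEnt, hiM, List.getElem_replicate]

lemma pvInit_inv (M : List Int) :
    pvInv M (List.replicate M.length 0)
      ((PySem.List.enumerate M).foldl (fun pq im => pvIns (im.2, im.1) pq) []) := by
  obtain ⟨s1, s2⟩ := pvBuild (PySem.List.enumerate M) [] (by simp)
  refine ⟨by simp, s1, ?_⟩
  refine s2.trans ?_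
  rw [List.append_nil, pvInit_entries]

-- ===== VERDICT (by name: the statement is the Claim_ definition above) =====
theorem chargeMission_spec : Claim_equal_chargeMission := by
  intro M N _ hpre
  unfold Spec_chargeMission chargeMission chargeMission_alt
  by_cases hN : N ≤ 0
  · simp [hN]
  · rcases hpre with hM | hM
    · rw [if_neg hN, if_neg hN]
      exact pvLoop_eq M hM N.toNat _ _ (pvInit_inv M)
    · exact absurd hM hN
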